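-- pv_equiv track=rewrite | github.com/mfactory-lab/sv-manager | roles/monitoring/files/measurement_validator_info.py | get_current_stake_metric
-- ===== SOURCE A (Python) =====
-- def get_current_stake_metric(stake_data):
--     active = 0
--     activating = 0
--     deactivating = 0
--     active_cnt = 0
--     activating_cnt = 0
--     deactivating_cnt = 0
--     for item in stake_data:
--         if 'activeStake' in item:
--             active = active + item.get('activeStake', 0)
--             active_cnt = active_cnt + 1
--         if 'activatingStake' in item:
--             activating = activating + item.get('activatingStake', 0)
--             activating_cnt = activating_cnt + 1
--         if 'deactivatingStake' in item:
--             deactivating = deactivating + item.get('deactivatingStake', 0)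
--             deactivating_cnt = deactivating_cnt + 1
--
--     return {
--         'active_stake': active,
--         'activating_stake': activating,
--         'deactivating_stake': deactivating,
--         'stake_holders': len(stake_data),
--         'active_cnt': active_cnt,
--         'activating_cnt': activating_cnt,
--         'deactivating_cnt': deactivating_cnt
--     }
-- ===== SOURCE B (Python) =====
-- def get_current_stake_metric(stake_data):
--     def agg(key):
--         hits = [item[key] for item in stake_data if key in item]
--         return sum(hits), len(hits)
--     active, active_cnt = agg('activeStake')
--     activating, activating_cnt = agg('activatingStake')
--     deactivating, deactivating_cnt = agg('deactivatingStake')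
--     return {
--         'active_stake': active,
--         'activating_stake': activating,
--         'deactivating_stake': deactivating,
--         'stake_holders': len(stake_data),
--         'active_cnt': active_cnt,
--         'activating_cnt': activating_cnt,
--         'deactivating_cnt': deactivating_cnt
--     }
-- ===== Notes on version B (the rewrite author's own statement) =====
-- stated objective: simpler
-- what changed: Replaces the single fused loop carrying six accumulators with one small helper that, per key, collects the matching values in a single comprehension and returns (sum, count) — three independent targeted passes instead of one six-state loop.
import Mathlib
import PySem

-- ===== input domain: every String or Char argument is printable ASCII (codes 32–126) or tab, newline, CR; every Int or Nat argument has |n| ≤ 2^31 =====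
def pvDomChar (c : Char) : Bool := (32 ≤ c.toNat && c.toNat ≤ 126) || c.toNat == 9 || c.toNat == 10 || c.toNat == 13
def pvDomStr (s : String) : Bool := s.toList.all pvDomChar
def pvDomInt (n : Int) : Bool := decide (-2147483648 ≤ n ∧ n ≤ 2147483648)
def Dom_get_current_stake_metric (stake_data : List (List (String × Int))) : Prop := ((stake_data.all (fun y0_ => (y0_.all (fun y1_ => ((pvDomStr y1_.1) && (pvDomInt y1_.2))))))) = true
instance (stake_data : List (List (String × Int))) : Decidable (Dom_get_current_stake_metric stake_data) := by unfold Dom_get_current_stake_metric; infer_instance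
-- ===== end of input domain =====

-- B replaces the fused six-accumulator loop with a per-key helper doing one comprehension pass per key (objective: simpler).
-- ===== PORT A =====
-- assoc-list lookup of a Python dict key: 'key in item' = (item.lookup key).isSome,
-- item.get(key, 0) = (item.lookup key).getD 0 (first match; Python dicts have unique keys).
def get_current_stake_metric (stake_data : List (List (String × Int))) : List (String × Int) :=
  let st := stake_data.foldl
    (fun (s : Int × Int × Int × Int × Int × Int) item =>
      let (active, activating, deactivating, active_cnt, activating_cnt, deactivating_cnt) := s
      let (active, active_cnt) :=
        if (item.lookup "activeStake").isSome then
          (active + (item.lookup "activeStake").getD 0, active_cnt + 1)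
        else (active, active_cnt)
      let (activating, activating_cnt) :=
        if (item.lookup "activatingStake").isSome then
          (activating + (item.lookup "activatingStake").getD 0, activating_cnt + 1)
        else (activating, activating_cnt)
      let (deactivating, deactivating_cnt) :=
        if (item.lookup "deactivatingStake").isSome then
          (deactivating + (item.lookup "deactivatingStake").getD 0, deactivating_cnt + 1)
        else (deactivating, deactivating_cnt)
      (active, activating, deactivating, active_cnt, activating_cnt, deactivating_cnt))
    (0, 0, 0, 0, 0, 0)
  let (active, activating, deactivating, active_cnt, activating_cnt, deactivating_cnt) := st
  [("active_stake", active), ("activating_stake", activating),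
   ("deactivating_stake", deactivating), ("stake_holders", (stake_data.length : Int)),
   ("active_cnt", active_cnt), ("activating_cnt", activating_cnt),
   ("deactivating_cnt", deactivating_cnt)]

-- ===== PORT B =====
-- B: per-key helper — one comprehension collecting the present values, then (sum, length).
def gcsm_agg (stake_data : List (List (String × Int))) (key : String) : Int × Int :=
  let hits := (stake_data.filter (fun item => (item.lookup key).isSome)).map
    (fun item => (item.lookup key).getD 0)   -- item[key]; key is present on every filtered item
  (hits.sum, (hits.length : Int))

def get_current_stake_metric_alt (stake_data : List (List (String × Int))) : List (String × Int) :=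
  let (active, active_cnt) := gcsm_agg stake_data "activeStake"
  let (activating, activating_cnt) := gcsm_agg stake_data "activatingStake"
  let (deactivating, deactivating_cnt) := gcsm_agg stake_data "deactivatingStake"
  [("active_stake", active), ("activating_stake", activating),
   ("deactivating_stake", deactivating), ("stake_holders", (stake_data.length : Int)),
   ("active_cnt", active_cnt), ("activating_cnt", activating_cnt),
   ("deactivating_cnt", deactivating_cnt)]

-- ===== PRECONDITION & SPEC =====
def Spec_get_current_stake_metric (stake_data : List (List (String × Int))) (out : List (String × Int)) : Prop := out = get_current_stake_metric_alt stake_data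
instance (stake_data : List (List (String × Int))) (out : List (String × Int)) : Decidable (Spec_get_current_stake_metric stake_data out) := by unfold Spec_get_current_stake_metric; infer_instance

-- ===== CLAIM (what is proved, stated in full; the proofs are below) =====
def Claim_equal_get_current_stake_metric : Prop := ∀ (stake_data : List (List (String × Int))), Dom_get_current_stake_metric stake_data → Spec_get_current_stake_metric stake_data (get_current_stake_metric stake_data)

-- ===== LEMMAS AND PROOFS =====

lemma gcsm_agg_cons (x : List (String × Int)) (xs : List (List (String × Int))) (key : String) :
    gcsm_agg (x :: xs) key =
      if (x.lookup key).isSome then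
        ((x.lookup key).getD 0 + (gcsm_agg xs key).1, (gcsm_agg xs key).2 + 1)
      else gcsm_agg xs key := by
  by_cases h : (x.lookup key).isSome <;> simp [gcsm_agg, h]

-- The fused fold, with arbitrary starting accumulators, adds exactly the per-key (sum, count) pairs.
lemma gcsm_loop_eq (l : List (List (String × Int))) :
    ∀ a g d ac gc dc : Int,
    l.foldl
      (fun (s : Int × Int × Int × Int × Int × Int) item =>
        let (active, activating, deactivating, active_cnt, activating_cnt, deactivating_cnt) := s
        let (active, active_cnt) :=
          if (item.lookup "activeStake").isSome then
            (active + (item.lookup "activeStake").getD 0, active_cnt + 1)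
          else (active, active_cnt)
        let (activating, activating_cnt) :=
          if (item.lookup "activatingStake").isSome then
            (activating + (item.lookup "activatingStake").getD 0, activating_cnt + 1)
          else (activating, activating_cnt)
        let (deactivating, deactivating_cnt) :=
          if (item.lookup "deactivatingStake").isSome then
            (deactivating + (item.lookup "deactivatingStake").getD 0, deactivating_cnt + 1)
          else (deactivating, deactivating_cnt)
        (active, activating, deactivating, active_cnt, activating_cnt, deactivating_cnt))
      (a, g, d, ac, gc, dc)
    = (a + (gcsm_agg l "activeStake").1, g + (gcsm_agg l "activatingStake").1,
       d + (gcsm_agg l "deactivatingStake").1, ac + (gcsm_agg l "activeStake").2,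
       gc + (gcsm_agg l "activatingStake").2, dc + (gcsm_agg l "deactivatingStake").2) := by
  induction l with
  | nil => intro a g d ac gc dc; simp [gcsm_agg]
  | cons x xs ih =>
    intro a g d ac gc dc
    simp only [List.foldl_cons]
    rw [gcsm_agg_cons, gcsm_agg_cons, gcsm_agg_cons, ih]
    by_cases h1 : (x.lookup "activeStake").isSome <;>
      by_cases h2 : (x.lookup "activatingStake").isSome <;>
        by_cases h3 : (x.lookup "deactivatingStake").isSome <;>
          simp only [h1, h2, h3, if_true, if_false, Bool.false_eq_true] <;>
          refine Prod.ext ?_ (Prod.ext ?_ (Prod.ext ?_ (Prod.ext ?_ (Prod.ext ?_ ?_)))) <;>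
          simp <;> ring

-- ===== VERDICT (by name: the statement is the Claim_ definition above) =====
theorem get_current_stake_metric_spec : Claim_equal_get_current_stake_metric := by
  intro stake_data _
  unfold Spec_get_current_stake_metric get_current_stake_metric get_current_stake_metric_alt
  rw [gcsm_loop_eq]
  simp
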